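-- pv_equiv track=rewrite | github.com/wittrup/crap | python/psl.py | sf
-- ===== SOURCE A (Python) =====
-- def sf(s): #convert special string to float
--     hs = False # hit seperator
--     o = ''
--     for c in s:
--         if c.isnumeric() or c == '-':
--             o += c
--         elif not hs and c in ['.', ',']:
--             hs = True
--             o += c
--     return o
-- ===== SOURCE B (Python) =====
-- def sf(s): #convert special string to float
--     for i, c in enumerate(s):
--         if c in ('.', ','):
--             left = ''.join(ch for ch in s[:i] if ch.isnumeric() or ch == '-')
--             right = ''.join(ch for ch in s[i+1:] if ch.isnumeric() or ch == '-')
--             return left + c + right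
--     return ''.join(ch for ch in s if ch.isnumeric() or ch == '-')
-- ===== Notes on version B (the rewrite author's own statement) =====
-- stated objective: alternative
-- what changed: Replaces A's stateful single pass (hit-separator flag carried through one loop) with a locate-then-split decomposition: find the first '.' or ',' , then filter the two halves independently and join around the kept separator.
import Mathlib
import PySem

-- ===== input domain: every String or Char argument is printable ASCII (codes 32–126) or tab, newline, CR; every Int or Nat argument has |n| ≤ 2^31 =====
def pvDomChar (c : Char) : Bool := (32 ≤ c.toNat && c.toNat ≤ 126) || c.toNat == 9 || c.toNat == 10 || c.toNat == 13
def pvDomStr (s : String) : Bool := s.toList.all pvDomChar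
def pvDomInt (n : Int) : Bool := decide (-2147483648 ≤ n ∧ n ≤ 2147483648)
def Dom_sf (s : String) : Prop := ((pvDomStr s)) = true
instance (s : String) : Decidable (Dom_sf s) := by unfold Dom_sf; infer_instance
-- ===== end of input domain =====

-- B replaces A's stateful single pass (hit-separator flag) with locate-first-separator,
-- then filter the two halves independently (objective: alternative decomposition).


-- ===== PORT A =====
-- c.isnumeric() ∨ c == '-'; exact on the ASCII domain (isnumeric = '0'..'9' there)
def sfKeepA (c : Char) : Bool := ('0' ≤ c && c ≤ '9') || c = '-'

-- one pass with the hit-separator flag, as in A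
def sfStep (st : Bool × List Char) (c : Char) : Bool × List Char :=
  if sfKeepA c then (st.1, st.2 ++ [c])
  else if !st.1 && (c = '.' || c = ',') then (true, st.2 ++ [c])
  else st

def sf (s : String) : String :=
  (s.toList.foldl sfStep (false, [])).2.asString

-- ===== PORT B =====
def sfKeepB (c : Char) : Bool := ('0' ≤ c && c ≤ '9') || c = '-'

-- the enumerate-scan of Source B: split the char list at the FIRST '.' or ','
def sfSplitSep : List Char → Option (List Char × Char × List Char)
  | [] => none
  | c :: r =>
    if c = '.' || c = ',' then some ([], c, r)
    else match sfSplitSep r with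
      | none => none
      | some (p, x, q) => some (c :: p, x, q)

def sf_alt (s : String) : String :=
  match sfSplitSep s.toList with
  | none => (s.toList.filter sfKeepB).asString
  | some (pre, c, post) =>
      ((pre.filter sfKeepB) ++ c :: (post.filter sfKeepB)).asString

-- ===== PRECONDITION & SPEC =====
def Spec_sf (s : String) (out : String) : Prop := out = sf_alt s
instance (s : String) (out : String) : Decidable (Spec_sf s out) := by unfold Spec_sf; infer_instance

-- ===== CLAIM (what is proved, stated in full; the proofs are below) =====
def Claim_equal_sf : Prop := ∀ (s : String), Dom_sf s → Spec_sf s (sf s)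

-- ===== LEMMAS AND PROOFS =====

-- keep and separator are disjoint
theorem sfKeep_not_sep {c : Char} (h : sfKeepA c = true) : (c = '.' || c = ',') = false := by
  simp [sfKeepA] at h
  rcases h with h | h
  · simp only [Bool.or_eq_false_iff, decide_eq_false_iff_not]
    constructor <;> rintro rfl <;> simp_all
  · subst h; decide

-- after the separator was hit, the loop just filters with sfKeepA
theorem sfFold_true (l : List Char) (acc : List Char) :
    l.foldl sfStep (true, acc) = (true, acc ++ l.filter sfKeepA) := by
  induction l generalizing acc with
  | nil => simp
  | cons c r ih =>
    by_cases hk : sfKeepA c = true <;> simp [sfStep, hk, ih, List.filter_cons]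

-- characterisation of the loop starting with flag false, via the split at the first separator
theorem sfFold_false (l : List Char) (acc : List Char) :
    l.foldl sfStep (false, acc) =
      match sfSplitSep l with
      | none => (false, acc ++ l.filter sfKeepA)
      | some (p, c, q) => (true, acc ++ p.filter sfKeepA ++ c :: q.filter sfKeepA) := by
  induction l generalizing acc with
  | nil => simp [sfSplitSep]
  | cons c r ih =>
    by_cases hk : sfKeepA c = true
    · have hs := sfKeep_not_sep hk
      simp only [List.foldl_cons, sfStep, hk, Bool.false_eq_true, reduceIte]
      rw [ih]
      simp [sfSplitSep, hs, List.filter_cons, hk]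
      cases h : sfSplitSep r with
      | none => simp
      | some t => rcases t with ⟨p, x, q⟩; simp [List.filter_cons, hk]
    · by_cases hs : (c = '.' || c = ',') = true
      · simp only [List.foldl_cons, sfStep, hk, Bool.not_false, Bool.true_and, hs,
          Bool.false_eq_true, reduceIte]
        rw [sfFold_true]
        simp [sfSplitSep, hs, List.filter_cons, hk]
      · simp only [List.foldl_cons, sfStep, hk, Bool.not_false, Bool.true_and,
          eq_false_of_ne_true hs, Bool.false_eq_true, reduceIte]
        rw [ih]
        simp only [sfSplitSep, eq_false_of_ne_true hs, Bool.false_eq_true, reduceIte]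
        cases h : sfSplitSep r with
        | none => simp [h, List.filter_cons, hk]
        | some t =>
          rcases t with ⟨p, x, q⟩
          simp [h, List.filter_cons, hk]

-- ===== VERDICT (by name: the statement is the Claim_ definition above) =====
theorem sf_spec : Claim_equal_sf := by
  intro s _
  unfold Spec_sf sf sf_alt
  rw [sfFold_false]
  have hk : sfKeepA = sfKeepB := rfl
  cases h : sfSplitSep s.toList with
  | none => simp [hk]
  | some t =>
    rcases t with ⟨p, c, q⟩
    simp [hk]
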